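-- pv_equiv track=rewrite | github.com/akuwano/databricks-perf-toolkit | dabs/app/core/extractors.py | _guess_federation_source_type
-- ===== SOURCE A (Python) =====
-- def _guess_federation_source_type(table_ref: str) -> str:
--     """Best-effort source-type heuristic from a fully-qualified table name.
--
--     Profile JSON does not carry the connection provider directly, so
--     we fall back to naming conventions. Returns one of
--     ``"bigquery" | "snowflake" | "mysql" | "postgresql" | "redshift"``
--     or ``""`` when no signal is present — callers treat empty as
--     "Lakehouse Federation, source unknown". v5.18.0.
--     """
--     if not table_ref:
--         return ""
--     catalog = table_ref.split(".", 1)[0].lower()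
--     checks = (
--         (("bq", "bigquery"), "bigquery"),
--         (("sf", "snowflake"), "snowflake"),
--         (("mysql",), "mysql"),
--         (("pg", "postgres", "postgresql"), "postgresql"),
--         (("redshift",), "redshift"),
--     )
--     for tokens, source in checks:
--         for tok in tokens:
--             # Look for the token as a whole segment or a surrounding
--             # underscore-delimited fragment (``bq_prod`` →
--             # ``_bq_``). This avoids false positives like ``sfr`` or
--             # ``mysqldump`` in a catalog name.
--             if f"_{tok}_" in f"_{catalog}_" or catalog == tok:
--                 return source
--     return ""
-- ===== SOURCE B (Python) =====
-- _CHECKS = (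
--     (("bq", "bigquery"), "bigquery"),
--     (("sf", "snowflake"), "snowflake"),
--     (("mysql",), "mysql"),
--     (("pg", "postgres", "postgresql"), "postgresql"),
--     (("redshift",), "redshift"),
-- )
--
-- # token -> (priority rank, source), built once at import time
-- _INDEX = {}
-- for _rank, (_tokens, _source) in enumerate(_CHECKS):
--     for _tok in _tokens:
--         _INDEX[_tok] = (_rank, _source)
--
--
-- def _guess_federation_source_type(table_ref: str) -> str:
--     if not table_ref:
--         return ""
--     catalog = table_ref.split(".", 1)[0].lower()
--     best = None
--     for seg in catalog.split("_"):
--         hit = _INDEX.get(seg)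
--         if hit is not None and (best is None or hit[0] < best[0]):
--             best = hit
--     return best[1] if best is not None else ""
-- ===== Notes on version B (the rewrite author's own statement) =====
-- stated objective: alternative
-- what changed: Replaces the nested checks-loop with substring tests by a precomputed token-to-(priority rank, source) index dict and a single pass over the catalog's underscore-split segments keeping the minimum-rank hit.
import Mathlib
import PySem

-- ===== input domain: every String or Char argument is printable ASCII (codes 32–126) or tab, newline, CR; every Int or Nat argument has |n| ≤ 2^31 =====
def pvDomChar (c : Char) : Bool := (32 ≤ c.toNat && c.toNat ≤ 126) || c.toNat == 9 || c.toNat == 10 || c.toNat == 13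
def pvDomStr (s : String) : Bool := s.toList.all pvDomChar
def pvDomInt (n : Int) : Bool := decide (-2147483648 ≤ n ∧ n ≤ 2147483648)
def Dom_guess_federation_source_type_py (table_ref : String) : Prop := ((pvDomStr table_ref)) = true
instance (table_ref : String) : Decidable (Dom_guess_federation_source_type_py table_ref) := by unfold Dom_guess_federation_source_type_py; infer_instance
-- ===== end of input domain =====

-- B replaces A's nested checks-loop of substring tests by a precomputed token->(rank, source)
-- index and one pass over the catalog's underscore-split segments keeping the minimum-rank hit
-- (alternative decomposition, same exact behaviour).

-- ===== PORT A =====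
def pvChecks : List (List (List Char) × String) :=
  [(["bq".toList, "bigquery".toList], "bigquery"),
   (["sf".toList, "snowflake".toList], "snowflake"),
   (["mysql".toList], "mysql"),
   (["pg".toList, "postgres".toList, "postgresql".toList], "postgresql"),
   (["redshift".toList], "redshift")]

-- inner 'for tok in tokens' loop: first token that tests true returns the check's source,
-- so it is the loop computing whether some token of this check hits
def pvTokHit (catalog : List Char) : List (List Char) → Bool
  | [] => false
  | tok :: rest =>
    if PySem.Chars.isIn ('_' :: tok ++ ['_']) ('_' :: catalog ++ ['_']) || catalog == tok
    then true else pvTokHit catalog rest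

-- outer 'for tokens, source in checks' loop
def pvChecksLoop (catalog : List Char) : List (List (List Char) × String) → String
  | [] => ""
  | (tokens, source) :: rest =>
    if pvTokHit catalog tokens then source else pvChecksLoop catalog rest

def guess_federation_source_type_py (table_ref : String) : String :=
  if table_ref == "" then ""
  else
    let catalog := PySem.Chars.lower ((((PySem.Str.splitMax? table_ref "." 1).getD []).headD "").toList)
    pvChecksLoop catalog pvChecks

-- ===== PORT B =====
-- module-level '_INDEX' built once from enumerate(_CHECKS) (the same literal table as A's)
def pvIndex : PySem.Dict (List Char) (Int × String) :=
  (PySem.List.enumerate pvChecks).foldl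
    (fun d p => p.2.1.foldl (fun d tok => d.insert tok (p.1, p.2.2)) d) PySem.Dict.empty

-- loop body: '_INDEX.get(seg)' and keep the hit with the smallest rank
def pvBestStep (best : Option (Int × String)) (seg : List Char) : Option (Int × String) :=
  match pvIndex.get? seg with
  | some hit =>
    match best with
    | some b => if hit.1 < b.1 then some hit else some b
    | none => some hit
  | none => best

def guess_federation_source_type_py_alt (table_ref : String) : String :=
  if table_ref == "" then ""
  else
    let catalog := PySem.Chars.lower ((((PySem.Str.splitMax? table_ref "." 1).getD []).headD "").toList)
    let segs := PySem.Chars.splitOn catalog ['_']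
    match segs.foldl pvBestStep none with
    | some b => b.2
    | none => ""

-- ===== PRECONDITION & SPEC =====
def Spec_guess_federation_source_type_py (table_ref : String) (out : String) : Prop := out = guess_federation_source_type_py_alt table_ref
instance (table_ref : String) (out : String) : Decidable (Spec_guess_federation_source_type_py table_ref out) := by unfold Spec_guess_federation_source_type_py; infer_instance

-- ===== CLAIM (what is proved, stated in full; the proofs are below) =====
def Claim_equal_guess_federation_source_type_py : Prop := ∀ (table_ref : String), Dom_guess_federation_source_type_py table_ref → Spec_guess_federation_source_type_py table_ref (guess_federation_source_type_py table_ref)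

-- ===== LEMMAS AND PROOFS =====
def pvSplit : List Char → List (List Char)
  | [] => [[]]
  | c :: rest => if c = '_' then [] :: pvSplit rest else (pvSplit rest).modifyHead (c :: ·)

theorem pvSplit_ne_nil (c : List Char) : pvSplit c ≠ [] := by
  induction c with
  | nil => simp [pvSplit]
  | cons d r ih =>
    simp only [pvSplit]
    split
    · simp
    · cases h : pvSplit r with
      | nil => exact absurd h ih
      | cons a l => simp

theorem pvSplit_head (c : List Char) :
    (pvSplit c).head? = some (c.takeWhile (· ≠ '_')) := by
  induction c with
  | nil => simp [pvSplit]
  | cons d r ih =>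
    by_cases hd : d = '_'
    · subst hd; simp [pvSplit]
    · simp only [pvSplit, if_neg hd]
      cases hps : pvSplit r with
      | nil => exact absurd hps (pvSplit_ne_nil r)
      | cons a tl =>
        rw [hps] at ih
        simp only [List.head?_cons, Option.some_inj] at ih
        simp [List.takeWhile, hd, ih]

-- first-segment characterization of a prefix
theorem pvQchar (t c : List Char) (ht : '_' ∉ t) :
    t ++ ['_'] <+: c ++ ['_'] ↔ t = c.takeWhile (· ≠ '_') := by
  induction t generalizing c with
  | nil =>
    cases c with
    | nil => simp
    | cons b c' =>
      simp only [List.nil_append, List.takeWhile_cons]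
      constructor
      · intro h
        have := List.cons_prefix_cons.mp h
        simp [this.1.symm]
      · intro h
        by_cases hb : b = '_'
        · subst hb; exact List.cons_prefix_cons.mpr ⟨rfl, List.nil_prefix⟩
        · simp [hb] at h
  | cons a t' ih =>
    have ha : a ≠ '_' := fun h => ht (h ▸ List.mem_cons_self)
    have ht' : '_' ∉ t' := fun h => ht (List.mem_cons_of_mem _ h)
    cases c with
    | nil =>
      simp only [List.nil_append, List.takeWhile_nil, List.cons_append]
      constructor
      · intro h
        have := List.cons_prefix_cons.mp h
        exact absurd this.1 ha
      · intro h; simp at h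
    | cons b c' =>
      simp only [List.cons_append, List.cons_prefix_cons, ih c' ht', List.takeWhile_cons]
      constructor
      · rintro ⟨rfl, h2⟩
        simp [ha, h2]
      · intro h
        by_cases hb : b = '_'
        · subst hb; simp at h
        · simp [hb] at h
          exact ⟨h.1, by simpa using h.2⟩

theorem pvInfix_nil (t : List Char) : ¬ ('_' :: t ++ ['_'] <:+: ['_']) := by
  intro h
  have := h.length_le
  simp at this

-- tail membership ↔ occurrence strictly after the leading '_'
theorem pvG2 (t : List Char) (ht : '_' ∉ t) (c : List Char) :
    t ∈ (pvSplit c).tail ↔ '_' :: t ++ ['_'] <:+: c ++ ['_'] := by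
  induction c with
  | nil =>
    simp only [pvSplit, List.tail_cons, List.not_mem_nil, false_iff, List.nil_append]
    exact pvInfix_nil t
  | cons d c' ih =>
    by_cases hd : d = '_'
    · subst hd
      simp only [pvSplit, List.cons_append]
      rw [List.infix_cons_iff]
      cases hps : pvSplit c' with
      | nil => exact absurd hps (pvSplit_ne_nil c')
      | cons a tl =>
        have hhead := pvSplit_head c'
        rw [hps] at hhead
        simp only [List.head?_cons, Option.some_inj] at hhead
        rw [hps] at ih
        simp only [List.tail_cons] at ih
        constructor
        · intro hm
          rcases List.mem_cons.mp hm with rfl | hm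
          · left
            exact List.cons_prefix_cons.mpr ⟨rfl, (pvQchar t c' ht).mpr hhead⟩
          · right; exact ih.mp hm
        · rintro (hp | hi)
          · have := (List.cons_prefix_cons.mp hp).2
            have := (pvQchar t c' ht).mp this
            rw [← hhead] at this
            exact this ▸ List.mem_cons_self
          · exact List.mem_cons_of_mem _ (ih.mpr hi)
    · simp only [pvSplit, if_neg hd]
      have htail : ((pvSplit c').modifyHead (d :: ·)).tail = (pvSplit c').tail := by
        cases hps : pvSplit c' with
        | nil => exact absurd hps (pvSplit_ne_nil c')
        | cons a tl => simp
      rw [htail, ih]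
      simp only [List.cons_append]
      rw [List.infix_cons_iff]
      constructor
      · intro h; right; exact h
      · rintro (hp | hi)
        · have := (List.cons_prefix_cons.mp hp).1
          exact absurd this.symm hd
        · exact hi

theorem pvG1 (t : List Char) (ht : '_' ∉ t) (c : List Char) :
    t ∈ pvSplit c ↔ '_' :: t ++ ['_'] <:+: '_' :: c ++ ['_'] := by
  simp only [List.cons_append]
  rw [List.infix_cons_iff]
  cases hps : pvSplit c with
  | nil => exact absurd hps (pvSplit_ne_nil c)
  | cons a tl =>
    have hhead := pvSplit_head c
    rw [hps] at hhead
    simp only [List.head?_cons, Option.some_inj] at hhead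
    have htl := pvG2 t ht c
    rw [hps] at htl
    simp only [List.tail_cons] at htl
    constructor
    · intro hm
      rcases List.mem_cons.mp hm with rfl | hm
      · left; exact List.cons_prefix_cons.mpr ⟨rfl, (pvQchar t c ht).mpr hhead⟩
      · right; exact htl.mp hm
    · rintro (hp | hi)
      · have := (pvQchar t c ht).mp (List.cons_prefix_cons.mp hp).2
        rw [← hhead] at this
        exact this ▸ List.mem_cons_self
      · exact List.mem_cons_of_mem _ (htl.mpr hi)

theorem pvSplit_self (t : List Char) (ht : '_' ∉ t) : pvSplit t = [t] := by
  induction t with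
  | nil => rfl
  | cons a t' ih =>
    have ha : a ≠ '_' := fun h => ht (h ▸ List.mem_cons_self)
    have ht' : '_' ∉ t' := fun h => ht (List.mem_cons_of_mem _ h)
    simp [pvSplit, ha, ih ht']

-- A's whole token test equals membership of the token among the '_'-segments
theorem pvCond (t c : List Char) (ht : '_' ∉ t) :
    (PySem.Chars.isIn ('_' :: t ++ ['_']) ('_' :: c ++ ['_']) || c == t) = true
      ↔ t ∈ pvSplit c := by
  rw [Bool.or_eq_true, PySem.Chars.isIn_iff_infix, beq_iff_eq, ← pvG1 t ht c]
  constructor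
  · rintro (h | rfl)
    · exact h
    · rw [pvSplit_self c ht]
      exact List.mem_singleton.mpr rfl
  · intro h; left; exact h


def pvMerge : Option (Int × String) → Option (Int × String) → Option (Int × String)
  | a, none => a
  | none, some h => some h
  | some b, some h => if h.1 < b.1 then some h else some b

theorem pvBestStep_eq_merge (a : Option (Int × String)) (s : List Char) :
    pvBestStep a s = pvMerge a (pvIndex.get? s) := by
  rcases a with _ | b <;> rcases hg : pvIndex.get? s with _ | h <;>
    simp [pvBestStep, pvMerge, hg]

theorem pvMerge_none_left (x : Option (Int × String)) : pvMerge none x = x := by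
  rcases x with _ | h <;> rfl

theorem pvMerge_some (x y : Int × String) :
    pvMerge (some x) (some y) = if y.1 < x.1 then some y else some x := rfl

theorem pvMerge_assoc (a b c : Option (Int × String)) :
    pvMerge (pvMerge a b) c = pvMerge a (pvMerge b c) := by
  rcases c with _ | z
  · rfl
  rcases b with _ | y
  · rfl
  rcases a with _ | x
  · simp only [pvMerge]
    split_ifs <;> rfl
  · simp only [pvMerge_some]
    split_ifs <;> simp only [pvMerge_some] <;> split_ifs <;> first | rfl | omega

theorem pvFoldl_merge (l : List (List Char)) (a : Option (Int × String)) :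
    l.foldl pvBestStep a = pvMerge a (l.foldl pvBestStep none) := by
  induction l generalizing a with
  | nil => rcases a with _ | x <;> rfl
  | cons s l ih =>
    simp only [List.foldl_cons]
    rw [ih (pvBestStep a s), ih (pvBestStep none s),
        pvBestStep_eq_merge a s, pvBestStep_eq_merge none s,
        pvMerge_none_left, pvMerge_assoc]

theorem pvGval (s : List Char) :
    pvIndex.get? s =
      if "bq".toList = s then some ((0 : Int), "bigquery")
      else if "bigquery".toList = s then some (0, "bigquery")
      else if "sf".toList = s then some (1, "snowflake")
      else if "snowflake".toList = s then some (1, "snowflake")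
      else if "mysql".toList = s then some (2, "mysql")
      else if "pg".toList = s then some (3, "postgresql")
      else if "postgres".toList = s then some (3, "postgresql")
      else if "postgresql".toList = s then some (3, "postgresql")
      else if "redshift".toList = s then some (4, "redshift")
      else none := by
  have hIdx : pvIndex = PySem.Dict.mk
      [("bq".toList, ((0 : Int), "bigquery")), ("bigquery".toList, (0, "bigquery")),
       ("sf".toList, (1, "snowflake")), ("snowflake".toList, (1, "snowflake")),
       ("mysql".toList, (2, "mysql")),
       ("pg".toList, (3, "postgresql")), ("postgres".toList, (3, "postgresql")),
       ("postgresql".toList, (3, "postgresql")),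
       ("redshift".toList, (4, "redshift"))] := by decide
  rw [hIdx]
  simp only [PySem.Dict.get?_mk_cons, beq_iff_eq]
  rfl

def pvTarget (l : List (List Char)) : Option (Int × String) :=
  if "bq".toList ∈ l ∨ "bigquery".toList ∈ l then some ((0 : Int), "bigquery")
  else if "sf".toList ∈ l ∨ "snowflake".toList ∈ l then some (1, "snowflake")
  else if "mysql".toList ∈ l then some (2, "mysql")
  else if "pg".toList ∈ l ∨ "postgres".toList ∈ l ∨ "postgresql".toList ∈ l then some (3, "postgresql")
  else if "redshift".toList ∈ l then some (4, "redshift")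
  else none

set_option maxHeartbeats 1000000 in
theorem pvFold_eq_target (l : List (List Char)) :
    l.foldl pvBestStep none = pvTarget l := by
  induction l with
  | nil => simp [pvTarget]
  | cons s l ih =>
    simp only [List.foldl_cons]
    rw [pvFoldl_merge, ih, pvBestStep_eq_merge, pvMerge_none_left, pvGval]
    by_cases h1 : "bq".toList = s
    · subst h1
      simp only [pvTarget, List.mem_cons]
      norm_num
      split_ifs <;> simp_all [pvMerge]
    by_cases h2 : "bigquery".toList = s
    · subst h2
      simp only [pvTarget, List.mem_cons]
      norm_num
      split_ifs <;> simp_all [pvMerge]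
    by_cases h3 : "sf".toList = s
    · subst h3
      simp only [pvTarget, List.mem_cons]
      norm_num
      split_ifs <;> simp_all [pvMerge]
    by_cases h4 : "snowflake".toList = s
    · subst h4
      simp only [pvTarget, List.mem_cons]
      norm_num
      split_ifs <;> simp_all [pvMerge]
    by_cases h5 : "mysql".toList = s
    · subst h5
      simp only [pvTarget, List.mem_cons]
      norm_num
      split_ifs <;> simp_all [pvMerge]
    by_cases h6 : "pg".toList = s
    · subst h6
      simp only [pvTarget, List.mem_cons]
      norm_num
      split_ifs <;> simp_all [pvMerge]
    by_cases h7 : "postgres".toList = s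
    · subst h7
      simp only [pvTarget, List.mem_cons]
      norm_num
      split_ifs <;> simp_all [pvMerge]
    by_cases h8 : "postgresql".toList = s
    · subst h8
      simp only [pvTarget, List.mem_cons]
      norm_num
      split_ifs <;> simp_all [pvMerge]
    by_cases h9 : "redshift".toList = s
    · subst h9
      simp only [pvTarget, List.mem_cons]
      norm_num
      split_ifs <;> simp_all [pvMerge]
    simp only [if_neg h1, if_neg h2, if_neg h3, if_neg h4, if_neg h5, if_neg h6,
      if_neg h7, if_neg h8, if_neg h9, pvMerge_none_left]
    simp only [pvTarget, List.mem_cons, h1, h2, h3, h4, h5, h6, h7, h8, h9,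
      false_or]


theorem pvSplit_go (fuel : Nat) (l cur : List Char) (acc : List (List Char))
    (h : l.length < fuel) :
    PySem.Chars.splitOn.go ['_'] fuel l cur acc
      = acc.reverse ++ (pvSplit l).modifyHead (cur.reverse ++ ·) := by
  induction fuel generalizing l cur acc with
  | zero => omega
  | succ f ih =>
    cases l with
    | nil =>
      simp [PySem.Chars.splitOn.go, pvSplit]
    | cons c rest =>
      simp only [List.length_cons] at h
      rw [PySem.Chars.splitOn.go]
      by_cases hc : c = '_'
      · subst hc
        simp only [List.isPrefixOf, BEq.rfl, Bool.true_and, if_pos]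
        simp only [List.length_cons, List.length_nil, List.drop_succ_cons, List.drop_zero]
        rw [ih _ _ _ (by omega)]
        cases hps : pvSplit rest <;> simp [pvSplit, hps]
      · have hpre : List.isPrefixOf ['_'] (c :: rest) = false := by
          simp [List.isPrefixOf]
          exact fun hh => absurd hh.symm hc
        rw [hpre]
        simp only [Bool.false_eq_true, if_false]
        rw [ih _ _ _ (by omega)]
        simp only [pvSplit, if_neg hc]
        cases hps : pvSplit rest with
        | nil => exact absurd hps (pvSplit_ne_nil rest)
        | cons a tl => simp
theorem pvSplit_eq (c : List Char) : PySem.Chars.splitOn c ['_'] = pvSplit c := by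
  rw [PySem.Chars.splitOn, pvSplit_go _ _ _ _ (Nat.lt_succ_self _)]
  cases hps : pvSplit c with
  | nil => exact absurd hps (pvSplit_ne_nil c)
  | cons a tl => simp

theorem pvBoolDecide {P : Prop} [Decidable P] {b : Bool} (h : b = true ↔ P) : b = decide P := by
  by_cases hP : P
  · simp [hP, h.mpr hP]
  · cases hb : b
    · simp [hP]
    · exact absurd (h.mp hb) hP

theorem pvTokHit2 (c t1 t2 : List Char) (h1 : '_' ∉ t1) (h2 : '_' ∉ t2) :
    pvTokHit c [t1, t2] = decide (t1 ∈ pvSplit c ∨ t2 ∈ pvSplit c) := by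
  have e1 := pvBoolDecide (pvCond t1 c h1)
  have e2 := pvBoolDecide (pvCond t2 c h2)
  simp only [pvTokHit, e1, e2]
  by_cases p1 : t1 ∈ pvSplit c <;> by_cases p2 : t2 ∈ pvSplit c <;> simp [p1, p2]

theorem pvTokHit1 (c t1 : List Char) (h1 : '_' ∉ t1) :
    pvTokHit c [t1] = decide (t1 ∈ pvSplit c) := by
  have e1 := pvBoolDecide (pvCond t1 c h1)
  simp only [pvTokHit, e1]
  by_cases p1 : t1 ∈ pvSplit c <;> simp [p1]

theorem pvTokHit3 (c t1 t2 t3 : List Char) (h1 : '_' ∉ t1) (h2 : '_' ∉ t2) (h3 : '_' ∉ t3) :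
    pvTokHit c [t1, t2, t3] = decide (t1 ∈ pvSplit c ∨ t2 ∈ pvSplit c ∨ t3 ∈ pvSplit c) := by
  have e1 := pvBoolDecide (pvCond t1 c h1)
  have e2 := pvBoolDecide (pvCond t2 c h2)
  have e3 := pvBoolDecide (pvCond t3 c h3)
  simp only [pvTokHit, e1, e2, e3]
  by_cases p1 : t1 ∈ pvSplit c <;> by_cases p2 : t2 ∈ pvSplit c <;>
    by_cases p3 : t3 ∈ pvSplit c <;> simp [p1, p2, p3]

theorem pvCentral (c : List Char) :
    pvChecksLoop c pvChecks =
      (match pvTarget (pvSplit c) with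
       | some b => b.2
       | none => "") := by
  simp only [pvChecks, pvChecksLoop,
    pvTokHit2 c "bq".toList "bigquery".toList (by decide) (by decide),
    pvTokHit2 c "sf".toList "snowflake".toList (by decide) (by decide),
    pvTokHit1 c "mysql".toList (by decide),
    pvTokHit1 c "redshift".toList (by decide),
    pvTokHit3 c "pg".toList "postgres".toList "postgresql".toList (by decide) (by decide) (by decide),
    decide_eq_true_eq]
  unfold pvTarget
  split_ifs <;> rfl

theorem pv_main (table_ref : String) :
    guess_federation_source_type_py table_ref = guess_federation_source_type_py_alt table_ref := by
  unfold guess_federation_source_type_py guess_federation_source_type_py_alt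
  by_cases h : table_ref == ""
  · simp [h]
  · simp only [h, Bool.false_eq_true, if_false]
    rw [pvSplit_eq, pvFold_eq_target, pvCentral]

-- ===== VERDICT (by name: the statement is the Claim_ definition above) =====
theorem guess_federation_source_type_py_spec : Claim_equal_guess_federation_source_type_py := by
  intro table_ref _
  unfold Spec_guess_federation_source_type_py
  exact pv_main table_ref
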